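-- pv_equiv track=rewrite | github.com/SSurtijo/PCP-Group-2 | charts/charts_helpers.py | _prefix
-- ===== SOURCE A (Python) =====
-- def _prefix(x: str) -> str:
--     """Return 'FN.CAT' from control (PR.PS-01 → PR.PS)."""
--     if not x:
--         return ""
--     x = str(x).upper().strip()
--     if "-" in x:
--         x = x.split("-", 1)[0]
--     x = x.replace("_", ".").replace("-", ".")
--     while ".." in x:
--         x = x.replace("..", ".")
--     parts = [p for p in x.split(".") if p]
--     if len(parts) >= 2:
--         return f"{parts[0]}.{parts[1]}"
--     return parts[0] if parts else ""
-- ===== SOURCE B (Python) =====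
-- def _prefix(x: str) -> str:
--     """Return 'FN.CAT' from control (PR.PS-01 → PR.PS)."""
--     if not x:
--         return ""
--     head = str(x).upper().strip().split("-", 1)[0]
--     parts = []
--     cur = []
--     for c in head:
--         if c in "._":
--             if cur:
--                 parts.append("".join(cur))
--             cur = []
--         else:
--             cur.append(c)
--     if cur:
--         parts.append("".join(cur))
--     if len(parts) >= 2:
--         return f"{parts[0]}.{parts[1]}"
--     return parts[0] if parts else ""
-- ===== Notes on version B (the rewrite author's own statement) =====
-- stated objective: alternative
-- what changed: Replaces A's chain of whole-string rewrites (underscore and dash substitution, a repeated collapse loop for doubled delimiters, then split and filter) with a single left-to-right character scan over the dash-cut head that accumulates the maximal delimiter-free runs directly.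
import Mathlib
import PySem

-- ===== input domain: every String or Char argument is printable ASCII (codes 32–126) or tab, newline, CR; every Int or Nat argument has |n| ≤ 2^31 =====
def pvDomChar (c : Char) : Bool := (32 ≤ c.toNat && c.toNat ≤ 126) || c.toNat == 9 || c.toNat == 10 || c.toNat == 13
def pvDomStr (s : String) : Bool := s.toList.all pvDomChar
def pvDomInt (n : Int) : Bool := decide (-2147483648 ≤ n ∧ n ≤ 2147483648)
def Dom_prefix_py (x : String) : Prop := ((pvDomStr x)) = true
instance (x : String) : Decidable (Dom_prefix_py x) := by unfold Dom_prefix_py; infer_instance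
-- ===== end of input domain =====

-- B replaces A's replace/collapse/split chain by one linear scan accumulating the runs between '.'/'_' delimiters; same return value, no speed claim.

-- ===== PORT A =====
-- the `while ".." in x:` loop; fuel = current length (each replace shortens the string, so Python's loop terminates too)
def pvCollapse : Nat → List Char → List Char
  | 0, s => s
  | fuel+1, s =>
    if PySem.Chars.isIn ['.', '.'] s then pvCollapse fuel (PySem.Chars.replace s ['.', '.'] ['.']) else s

def prefix_py (x : String) : String :=
  if x = "" then ""
  else
    let cs := PySem.Chars.strip (PySem.Chars.upper x.toList)
    let cs := if PySem.Chars.isIn ['-'] cs then (PySem.Chars.splitOnMax cs ['-'] 1).headD [] else cs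
    let cs := PySem.Chars.replace (PySem.Chars.replace cs ['_'] ['.']) ['-'] ['.']
    let cs := pvCollapse cs.length cs
    let parts := (PySem.Chars.splitOn cs ['.']).filter (fun p => !p.isEmpty)
    if parts.length ≥ 2 then String.mk (parts[0]! ++ '.' :: parts[1]!)
    else if !parts.isEmpty then String.mk parts[0]! else ""

-- ===== PORT B =====
-- hand port of Source B's `if cur: parts.append("".join(cur))`
def pvFlush (s : List (List Char) × List Char) : List (List Char) :=
  if s.2.isEmpty then s.1 else s.1 ++ [s.2]

-- one step of Source B's `for c in head` loop (state = (parts, cur)); `c in "._"` is the two-char test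
def pvTokStep (s : List (List Char) × List Char) (c : Char) : List (List Char) × List Char :=
  if c = '.' ∨ c = '_' then (pvFlush s, []) else (s.1, s.2 ++ [c])

def prefix_py_alt (x : String) : String :=
  if x = "" then ""
  else
    let head := (PySem.Chars.splitOnMax (PySem.Chars.strip (PySem.Chars.upper x.toList)) ['-'] 1).headD []
    match pvFlush (head.foldl pvTokStep ([], [])) with
    | [] => ""
    | [p] => String.mk p
    | p0 :: p1 :: _ => String.mk (p0 ++ '.' :: p1)

-- ===== PRECONDITION & SPEC =====
def Spec_prefix_py (x : String) (out : String) : Prop := out = prefix_py_alt x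
instance (x : String) (out : String) : Decidable (Spec_prefix_py x out) := by unfold Spec_prefix_py; infer_instance

-- ===== CLAIM (what is proved, stated in full; the proofs are below) =====
def Claim_equal_prefix_py : Prop := ∀ (x : String), Dom_prefix_py x → Spec_prefix_py x (prefix_py x)

-- ===== LEMMAS AND PROOFS =====

-- proof-side: A's split-on-'.' as a left fold (state = (done pieces, current piece))
def spStep (s : List (List Char) × List Char) (c : Char) : List (List Char) × List Char :=
  if c = '.' then (s.1 ++ [s.2], []) else (s.1, s.2 ++ [c])

-- proof-side: tokenisation by '.' only, same shape as pvTokStep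
def dotStep (s : List (List Char) × List Char) (c : Char) : List (List Char) × List Char :=
  if c = '.' then (pvFlush s, []) else (s.1, s.2 ++ [c])

-- proof-side: structural form of one `x.replace("..", ".")` pass
def repSpec : List Char → List Char
  | [] => []
  | [c] => [c]
  | a :: b :: t => if a = '.' ∧ b = '.' then '.' :: repSpec t else a :: repSpec (b :: t)

theorem replace_go_single (a b : Char) (l acc : List Char) (fuel : Nat) (h : l.length ≤ fuel) :
    PySem.Chars.replace.go [a] [b] fuel l acc =
      acc.reverse ++ l.map (fun c => if c = a then b else c) := by
  induction l generalizing fuel acc with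
  | nil => cases fuel <;> simp [PySem.Chars.replace.go]
  | cons c t ih =>
    cases fuel with
    | zero => simp at h
    | succ fuel =>
      rw [PySem.Chars.replace.go]
      by_cases hc : c = a
      · subst hc
        simp [List.isPrefixOf, ih _ _ (by simpa using Nat.le_of_succ_le_succ (by simpa using h))]
      · simp [List.isPrefixOf, Ne.symm hc, hc, ih _ _ (by simpa using Nat.le_of_succ_le_succ (by simpa using h))]

theorem replace_single (a b : Char) (l : List Char) :
    PySem.Chars.replace l [a] [b] = l.map (fun c => if c = a then b else c) := by
  rw [PySem.Chars.replace]
  simpa using replace_go_single a b l [] l.length le_rfl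

theorem replace_go_dd (l acc : List Char) (fuel : Nat) (h : l.length ≤ fuel) :
    PySem.Chars.replace.go ['.', '.'] ['.'] fuel l acc = acc.reverse ++ repSpec l := by
  fun_induction repSpec l generalizing fuel acc with
  | case1 => cases fuel <;> simp [PySem.Chars.replace.go, repSpec]
  | case2 c =>
    cases fuel with
    | zero => simp at h
    | succ fuel =>
      rw [PySem.Chars.replace.go]
      by_cases hc : c = '.'
      · subst hc; simp [List.isPrefixOf, repSpec]
        cases fuel <;> simp [PySem.Chars.replace.go]
      · simp [List.isPrefixOf, hc, repSpec]
        cases fuel <;> simp [PySem.Chars.replace.go]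
  | case3 x y t hdd ih =>
    cases fuel with
    | zero => simp at h
    | succ fuel =>
      rw [PySem.Chars.replace.go]
      obtain ⟨hx, hy⟩ := hdd; subst hx; subst hy
      simp only [List.isPrefixOf, BEq.rfl, Bool.and_self, if_true]
      calc PySem.Chars.replace.go ['.', '.'] ['.'] fuel t ('.' :: acc)
          = ('.' :: acc).reverse ++ repSpec t := ih ('.' :: acc) fuel (by simp at h ⊢; omega)
        _ = acc.reverse ++ '.' :: repSpec t := by simp
  | case4 x y t hdd ih =>
    cases fuel with
    | zero => simp at h
    | succ fuel =>
      rw [PySem.Chars.replace.go]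
      have hp : ([('.' : Char), '.'].isPrefixOf (x :: y :: t)) = false := by
        simp [List.isPrefixOf]; intro hx hy; exact hdd ⟨hx.symm, hy.symm⟩
      rw [hp]
      simp only [Bool.false_eq_true, if_false]
      calc PySem.Chars.replace.go ['.', '.'] ['.'] fuel (y :: t) (x :: acc)
          = (x :: acc).reverse ++ repSpec (y :: t) := ih (x :: acc) fuel (by simp at h ⊢; omega)
        _ = acc.reverse ++ x :: repSpec (y :: t) := by simp

theorem replace_dd (l : List Char) :
    PySem.Chars.replace l ['.', '.'] ['.'] = repSpec l := by
  rw [PySem.Chars.replace]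
  simpa using replace_go_dd l [] l.length le_rfl

-- one collapse pass does not change the '.'-token scan
theorem dot_foldl_repSpec (l : List Char) (s : List (List Char) × List Char) :
    (repSpec l).foldl dotStep s = l.foldl dotStep s := by
  fun_induction repSpec l generalizing s with
  | case1 => rfl
  | case2 c => rfl
  | case3 x y t hdd ih =>
    obtain ⟨hx, hy⟩ := hdd; subst hx; subst hy
    simp only [List.foldl_cons, ih]
    have : dotStep (dotStep s '.') '.' = dotStep s '.' := by simp [dotStep, pvFlush]
    rw [this]
  | case4 x y t hdd ih => simp [ih]

theorem dot_foldl_collapse (fuel : Nat) (l : List Char) (s : List (List Char) × List Char) :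
    (pvCollapse fuel l).foldl dotStep s = l.foldl dotStep s := by
  induction fuel generalizing l with
  | zero => rfl
  | succ fuel ih =>
    rw [pvCollapse]
    by_cases hi : PySem.Chars.isIn ['.', '.'] l
    · rw [if_pos hi, ih, replace_dd, dot_foldl_repSpec]
    · rw [if_neg hi]

-- splitOn.go as a left fold
theorem splitOn_go_spec (l cur : List Char) (accs : List (List Char)) (fuel : Nat)
    (h : l.length ≤ fuel) :
    PySem.Chars.splitOn.go ['.'] fuel l cur accs =
      (l.foldl spStep (accs.reverse, cur.reverse)).1 ++ [(l.foldl spStep (accs.reverse, cur.reverse)).2] := by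
  induction l generalizing cur accs fuel with
  | nil => cases fuel <;> simp [PySem.Chars.splitOn.go, spStep]
  | cons c t ih =>
    cases fuel with
    | zero => simp at h
    | succ fuel =>
      rw [PySem.Chars.splitOn.go]
      by_cases hc : c = '.'
      · subst hc
        simp only [List.isPrefixOf, BEq.rfl, Bool.and_self, if_true]
        calc PySem.Chars.splitOn.go ['.'] fuel t [] (cur.reverse :: accs)
            = (t.foldl spStep ((cur.reverse :: accs).reverse, ([] : List Char).reverse)).1 ++
              [(t.foldl spStep ((cur.reverse :: accs).reverse, ([] : List Char).reverse)).2] :=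
              ih [] (cur.reverse :: accs) fuel (by simp at h ⊢; omega)
          _ = _ := by simp [spStep]
      · have hp : ([('.' : Char)].isPrefixOf (c :: t)) = false := by
          simp [List.isPrefixOf]; exact fun hx => hc hx.symm
        rw [hp]
        simp only [Bool.false_eq_true, if_false]
        calc PySem.Chars.splitOn.go ['.'] fuel t (c :: cur) accs
            = (t.foldl spStep (accs.reverse, (c :: cur).reverse)).1 ++
              [(t.foldl spStep (accs.reverse, (c :: cur).reverse)).2] :=
              ih (c :: cur) accs fuel (by simp at h ⊢; omega)
          _ = _ := by simp [spStep, hc]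

theorem splitOn_dot (l : List Char) :
    PySem.Chars.splitOn l ['.'] =
      (l.foldl spStep (([] : List (List Char)), [])).1 ++ [(l.foldl spStep (([] : List (List Char)), [])).2] := by
  rw [PySem.Chars.splitOn]
  simpa using splitOn_go_spec l [] [] (l.length + 1) (by omega)

-- filtering the split pieces = the '.'-token scan
theorem filter_sp_eq_dot (l : List Char) (P : List (List Char)) (cur : List Char) :
    ((l.foldl spStep (P, cur)).1 ++ [(l.foldl spStep (P, cur)).2]).filter (fun p => !p.isEmpty) =
      pvFlush (l.foldl dotStep (P.filter (fun p => !p.isEmpty), cur)) := by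
  induction l generalizing P cur with
  | nil =>
    simp only [List.foldl_nil, pvFlush, List.filter_append]
    by_cases hc : cur.isEmpty <;> simp [hc, List.filter]
  | cons c t ih =>
    by_cases hc : c = '.'
    · subst hc
      simp only [List.foldl_cons, spStep, dotStep, if_pos rfl]
      rw [ih]
      congr 1
      simp only [List.filter_append, pvFlush]
      by_cases hcur : cur.isEmpty <;> simp [hcur, List.filter]
    · simp only [List.foldl_cons, spStep, dotStep, if_neg hc]
      exact ih P (cur ++ [c])

-- the '.'-scan of the '_'→'.' mapped list is B's scan, when '-' does not occur
theorem dot_map_eq_tok (l : List Char) (h : '-' ∉ l) (s : List (List Char) × List Char) :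
    (l.map (fun c => if c = '_' then '.' else c)).foldl dotStep s = l.foldl pvTokStep s := by
  induction l generalizing s with
  | nil => rfl
  | cons c t ih =>
    simp only [List.map_cons, List.foldl_cons]
    rw [ih (fun hm => h (List.mem_cons_of_mem _ hm))]
    congr 1
    by_cases hu : c = '_'
    · subst hu; simp [dotStep, pvTokStep]
    · by_cases hd : c = '.'
      · subst hd; simp [dotStep, pvTokStep]
      · simp [dotStep, pvTokStep, hu, hd]

-- head piece of split("-", 1) is takeWhile
theorem splitOnMax_go_head (l cur : List Char) (accs : List (List Char)) (m fuel : Nat)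
    (h : l.length ≤ fuel) :
    ∃ r, PySem.Chars.splitOnMax.go ['-'] fuel m l cur accs =
      accs.reverse ++ (cur.reverse ++ (if m = 0 then l else l.takeWhile (· ≠ '-'))) :: r := by
  induction l generalizing cur accs m fuel with
  | nil =>
    refine ⟨[], ?_⟩
    cases fuel <;> cases m <;> simp [PySem.Chars.splitOnMax.go]
  | cons c t ih =>
    cases fuel with
    | zero => simp at h
    | succ fuel =>
      rw [PySem.Chars.splitOnMax.go]
      by_cases hm : m = 0
      · subst hm
        exact ⟨[], by simp⟩
      · rw [if_neg hm]
        by_cases hc : c = '-'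
        · subst hc
          simp only [List.isPrefixOf, BEq.rfl, Bool.and_self, if_true,
            List.length_singleton, List.drop_succ_cons, List.drop_zero]
          obtain ⟨r, hr⟩ := ih [] (cur.reverse :: accs) (m - 1) fuel (by simp at h ⊢; omega)
          refine ⟨(([] : List Char).reverse ++ (if m - 1 = 0 then t else t.takeWhile (· ≠ '-'))) :: r, ?_⟩
          rw [hr]
          simp [List.takeWhile, hm]
        · have hp : ([('-' : Char)].isPrefixOf (c :: t)) = false := by
            simp [List.isPrefixOf]; exact fun hx => hc hx.symm
          rw [hp]
          simp only [Bool.false_eq_true, if_false]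
          obtain ⟨r, hr⟩ := ih (c :: cur) accs m fuel (by simp at h ⊢; omega)
          refine ⟨r, ?_⟩
          rw [hr]
          simp [List.takeWhile, hc, hm]
theorem splitOnMax_head (l : List Char) :
    (PySem.Chars.splitOnMax l ['-'] 1).headD [] = l.takeWhile (· ≠ '-') := by
  rw [PySem.Chars.splitOnMax]
  rw [if_neg (by omega)]
  obtain ⟨r, hr⟩ := splitOnMax_go_head l [] [] (1 : Int).toNat (l.length + 1) (by omega)
  rw [hr]
  simp

theorem takeWhile_ne_of_not_mem (l : List Char) (h : '-' ∉ l) : l.takeWhile (· ≠ '-') = l := by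
  rw [List.takeWhile_eq_self_iff]
  intro a ha
  simp only [decide_eq_true_eq]
  exact fun he => h (he ▸ ha)

-- ===== VERDICT (by name: the statement is the Claim_ definition above) =====
theorem prefix_py_spec : Claim_equal_prefix_py := by
  intro x _
  unfold Spec_prefix_py
  by_cases hx : x = ""
  · simp [prefix_py, prefix_py_alt, hx]
  · simp only [prefix_py, prefix_py_alt, if_neg hx]
    rw [splitOnMax_head]
    set cs := PySem.Chars.strip (PySem.Chars.upper x.toList) with hcs
    set hd := cs.takeWhile (· ≠ '-') with hhd
    have hnd : '-' ∉ hd := by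
      intro hm
      have := List.mem_takeWhile_imp hm
      simp at this
    have hhead : (if PySem.Chars.isIn ['-'] cs then hd else cs) = hd := by
      by_cases hi : PySem.Chars.isIn ['-'] cs
      · rw [if_pos hi]
      · rw [if_neg hi]
        have h2 : ¬ (['-'] <:+: cs) := by
          rw [← PySem.Chars.isIn_eq_false_iff]
          simpa using hi
        have hmem : '-' ∉ cs := by
          intro hm
          obtain ⟨s1, t1, he⟩ := List.append_of_mem hm
          exact h2 ⟨s1, t1, by rw [he]; simp⟩
        exact (takeWhile_ne_of_not_mem cs hmem).symm
    rw [hhead]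
    have hnd' : '-' ∉ hd.map (fun c => if c = '_' then '.' else c) := by
      intro hm
      obtain ⟨a, ha, hfa⟩ := List.mem_map.mp hm
      by_cases hu : a = '_'
      · rw [hu, if_pos rfl] at hfa; simp at hfa
      · rw [if_neg hu] at hfa; exact hnd (hfa ▸ ha)
    have hrep2 : PySem.Chars.replace (PySem.Chars.replace hd ['_'] ['.']) ['-'] ['.']
        = hd.map (fun c => if c = '_' then '.' else c) := by
      rw [replace_single, replace_single]
      rw [List.map_map]
      apply List.map_congr_left
      intro a ha
      by_cases hu : a = '_'
      · simp [hu]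
      · have : a ≠ '-' := fun he => hnd (he ▸ ha)
        simp [hu, this]
    rw [hrep2]
    have hparts : ((PySem.Chars.splitOn
          (pvCollapse (hd.map (fun c => if c = '_' then '.' else c)).length
            (hd.map (fun c => if c = '_' then '.' else c))) ['.']).filter (fun p => !p.isEmpty))
        = pvFlush (hd.foldl pvTokStep ([], [])) := by
      rw [splitOn_dot]
      have := filter_sp_eq_dot (pvCollapse (hd.map (fun c => if c = '_' then '.' else c)).length
        (hd.map (fun c => if c = '_' then '.' else c))) [] []
      simp only [List.filter_nil] at this
      rw [this, dot_foldl_collapse, dot_map_eq_tok hd hnd]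
    rw [hparts]
    cases hparts2 : pvFlush (hd.foldl pvTokStep ([], [])) with
    | nil => simp
    | cons p0 rest =>
      cases rest with
      | nil => simp
      | cons p1 rest2 => simp
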